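-- pv_equiv track=rewrite | github.com/aethernavshulkraven-allain/IP-Assignment2 | two.py | courseValidity
-- ===== SOURCE A (Python) =====
-- def courseValidity(a):
--     check = False
--     for k in a:
--         if k.isdigit():
--             check = True
--             break
--
--     if check:
--         flag1, flag2 = True, True
--         for i in range(len(a)):
--             if a[i].isdigit():
--                 letters = a[:i]
--                 integers = a[i:]
--                 break
--
--         for i in letters:
--             if i.isdigit():
--                 flag1 = False
--                 break
--         for i in integers:
--             if i.isalpha():
--                 flag2 = False
--                 break
--
--         if flag1 and flag2:
--             return True
--
--         else:
--             return False
--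
--     else:
--         return False
-- ===== SOURCE B (Python) =====
-- def courseValidity(a):
--     seen_digit = False
--     for c in a:
--         if c.isdigit():
--             seen_digit = True
--         elif seen_digit and c.isalpha():
--             return False
--     return seen_digit
-- ===== Notes on version B (the rewrite author's own statement) =====
-- stated objective: simpler
-- what changed: Replaced A's find-first-digit scan, slicing into two substrings, and two separate re-scans by a single linear pass maintaining one seen_digit flag (rejecting a letter after a digit immediately); no substrings are built.
import Mathlib
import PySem

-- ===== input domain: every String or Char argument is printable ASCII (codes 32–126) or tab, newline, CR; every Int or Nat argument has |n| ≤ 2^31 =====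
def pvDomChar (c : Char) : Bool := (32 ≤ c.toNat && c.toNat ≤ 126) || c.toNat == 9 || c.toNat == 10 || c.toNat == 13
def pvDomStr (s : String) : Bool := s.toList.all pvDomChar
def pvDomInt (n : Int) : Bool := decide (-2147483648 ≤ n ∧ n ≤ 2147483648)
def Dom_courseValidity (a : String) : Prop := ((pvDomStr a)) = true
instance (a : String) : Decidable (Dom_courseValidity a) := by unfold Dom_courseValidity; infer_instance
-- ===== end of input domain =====

-- B replaces A's three scans plus substring slicing by one stateful pass; objective: simpler.

-- ===== PORT A =====
-- first loop: check = True iff some char is a digit (with break)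
def pvA_check : List Char → Bool
  | [] => false
  | k :: rest => if PySem.Chars.isdigit k then true else pvA_check rest

-- second loop: index of the first digit (the loop that sets letters/integers and breaks)
def pvA_firstDigit? : List Char → Option Nat
  | [] => none
  | k :: rest => if PySem.Chars.isdigit k then some 0 else (pvA_firstDigit? rest).map (· + 1)

-- third loop: flag1 = no digit in letters (with break)
def pvA_flag1 : List Char → Bool
  | [] => true
  | i :: rest => if PySem.Chars.isdigit i then false else pvA_flag1 rest

-- fourth loop: flag2 = no alpha in integers (with break)
def pvA_flag2 : List Char → Bool
  | [] => true
  | i :: rest => if PySem.Chars.isalpha i then false else pvA_flag2 rest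

def courseValidity (a : String) : Bool :=
  let cs := a.toList
  if pvA_check cs then
    match pvA_firstDigit? cs with
    | some i =>
      let letters := PySem.List.slice cs none (some (i : Int))   -- a[:i]
      let integers := PySem.List.slice cs (some (i : Int)) none  -- a[i:]
      if pvA_flag1 letters && pvA_flag2 integers then true else false
    | none => false  -- unreachable: pvA_check = true guarantees a first digit exists
  else false

-- ===== PORT B =====
def pvB_go (seen : Bool) : List Char → Bool
  | [] => seen
  | c :: rest =>
    if PySem.Chars.isdigit c then pvB_go true rest
    else if seen && PySem.Chars.isalpha c then false
    else pvB_go seen rest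

def courseValidity_alt (a : String) : Bool := pvB_go false a.toList

-- ===== PRECONDITION & SPEC =====
def Spec_courseValidity (a : String) (out : Bool) : Prop := out = courseValidity_alt a
instance (a : String) (out : Bool) : Decidable (Spec_courseValidity a out) := by unfold Spec_courseValidity; infer_instance

-- ===== CLAIM (what is proved, stated in full; the proofs are below) =====
def Claim_equal_courseValidity : Prop := ∀ (a : String), Dom_courseValidity a → Spec_courseValidity a (courseValidity a)

-- ===== LEMMAS AND PROOFS =====

theorem pv_digit_not_alpha (c : Char) (h : PySem.Chars.isdigit c = true) :
    PySem.Chars.isalpha c = false := by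
  simp [PySem.Chars.isdigit, Char.le_def, UInt32.le_iff_toNat_le] at h
  simp [PySem.Chars.isalpha, PySem.Chars.isupper, PySem.Chars.islower, Char.le_def,
    UInt32.le_iff_toNat_le]
  omega

-- no digit seen yet and none remaining: B returns false
theorem pvB_go_false_of_no_digit (cs : List Char) (h : pvA_check cs = false) :
    pvB_go false cs = false := by
  induction cs with
  | nil => rfl
  | cons c rest ih =>
    simp only [pvA_check] at h
    simp only [pvB_go]
    by_cases hd : PySem.Chars.isdigit c = true
    · simp [hd] at h
    · simp only [Bool.not_eq_true] at hd
      simp only [hd, Bool.false_eq_true, if_false, Bool.false_and]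
      exact ih (by simpa [hd] using h)

-- after the first digit, A's flag2 scan is B's seen=true run
theorem pvA_flag2_eq_go_true (cs : List Char) : pvA_flag2 cs = pvB_go true cs := by
  induction cs with
  | nil => rfl
  | cons c rest ih =>
    simp only [pvA_flag2, pvB_go, Bool.true_and]
    by_cases hd : PySem.Chars.isdigit c = true
    · simp [hd, pv_digit_not_alpha c hd, ih]
    · simp only [Bool.not_eq_true] at hd
      simp [hd, ih]

-- check = true iff a first digit exists
theorem pvA_firstDigit_of_check (cs : List Char) (h : pvA_check cs = true) :
    ∃ i, pvA_firstDigit? cs = some i := by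
  induction cs with
  | nil => simp [pvA_check] at h
  | cons c rest ih =>
    simp only [pvA_check] at h
    by_cases hd : PySem.Chars.isdigit c = true
    · exact ⟨0, by simp [pvA_firstDigit?, hd]⟩
    · simp only [Bool.not_eq_true] at hd
      simp only [hd, Bool.false_eq_true, if_false] at h ⊢
      obtain ⟨i, hi⟩ := ih h
      exact ⟨i + 1, by simp [pvA_firstDigit?, hd, hi]⟩

-- the list-level main lemma: A's whole body equals B's single pass
theorem pv_main (cs : List Char) :
    (if pvA_check cs then
      match pvA_firstDigit? cs with
      | some i =>
        if pvA_flag1 (PySem.List.slice cs none (some (i : Int))) &&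
           pvA_flag2 (PySem.List.slice cs (some (i : Int)) none) then true else false
      | none => false
     else false) = pvB_go false cs := by
  induction cs with
  | nil => rfl
  | cons c rest ih =>
    by_cases hd : PySem.Chars.isdigit c = true
    · -- first char is a digit: split at 0, letters empty
      simp only [pvA_check, pvA_firstDigit?, hd, if_true]
      simp only [PySem.List.slice_to_natCast, PySem.List.slice_from_natCast,
        List.take_zero, List.drop_zero, pvA_flag1, Bool.true_and]
      simp only [pvB_go, hd, if_true]
      rw [← pvA_flag2_eq_go_true]
      simp [pvA_flag2, pv_digit_not_alpha c hd]
    · simp only [Bool.not_eq_true] at hd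
      simp only [pvA_check, pvA_firstDigit?, hd, Bool.false_eq_true, if_false]
      by_cases hc : pvA_check rest = true
      · obtain ⟨i, hi⟩ := pvA_firstDigit_of_check rest hc
        simp only [hc, if_true, hi, Option.map_some]
        simp only [PySem.List.slice_to_natCast, PySem.List.slice_from_natCast,
          List.take_succ_cons, List.drop_succ_cons] at ih ⊢
        simp only [pvA_flag1, hd, Bool.false_eq_true, if_false]
        simp only [pvB_go, hd, Bool.false_eq_true, if_false, Bool.false_and]
        rw [← ih]
        simp [hc, hi]
      · simp only [Bool.not_eq_true] at hc
        simp only [hc, Bool.false_eq_true, if_false]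
        simp only [pvB_go, hd, Bool.false_eq_true, if_false, Bool.false_and]
        exact (pvB_go_false_of_no_digit rest hc).symm

-- ===== VERDICT (by name: the statement is the Claim_ definition above) =====
theorem courseValidity_spec : Claim_equal_courseValidity := by
  intro a _
  unfold Spec_courseValidity courseValidity courseValidity_alt
  exact pv_main a.toList
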